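-- pv_equiv track=rewrite | github.com/OTOYO1020/ChatDev_Intermediate | WareHouse/C_240__20250512043832/takahashi.py | canReachCoordinate
-- ===== SOURCE A (Python) =====
-- from typing import List, Tuple
--
-- def canReachCoordinate(N: int, jumps: List[Tuple[int, int]], X: int) -> bool:
--     '''
--     Checks if Takahashi can reach coordinate X after N jumps.
--     '''
--     if N == 0 or not jumps:
--         return False
--     reachable_positions = {0}  # Start from position 0
--     for _ in range(N):
--         new_positions = set()
--         for position in reachable_positions:
--             for a, b in jumps:
--                 new_positions.add(position + a)
--                 new_positions.add(position + b)
--         reachable_positions = new_positions  # Update reachable positions for the next jump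
--     return X in reachable_positions
-- ===== SOURCE B (Python) =====
-- from typing import List, Tuple
--
-- def canReachCoordinate(N: int, jumps: List[Tuple[int, int]], X: int) -> bool:
--     '''
--     Reachable at X after exactly N jumps.  Shift by the minimum jump value m and decide
--     whether T = X - N*m is a sum of at most N of the gcd-reduced positive shifted coins:
--     by an unbounded min-coins DP on T when T is small, otherwise by a pruned enumeration
--     of per-value jump counts when that enumeration is small.
--     '''
--     if N <= 0 or not jumps:
--         return False
--     vals = sorted({v for pair in jumps for v in pair})
--     m = vals[0]
--     M = vals[-1]
--     T = X - N * m
--     if T < 0 or T > N * (M - m):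
--         return False
--     coins = [v - m for v in vals if v != m]
--     if not coins:
--         return True  # all jump values equal m, and the range check above forced T == 0
--     g = 0
--     for c in coins:
--         a, b = g, c
--         while b:
--             a, b = b, a % b
--         g = a
--     if T % g != 0:
--         return False
--     T = T // g
--     coins = [c // g for c in coins]
--     tree = 1  # size bound of the count-enumeration tree, capped
--     for i in range(1, len(vals) + 1):
--         tree = tree * (N + i) // i
--         if tree > 2000000:
--             break
--     if T <= 2000000 or tree > 2000000:
--         INF = N + 1
--         dp = [0]
--         for t in range(1, T + 1):
--             best = INF
--             for c in coins:
--                 if c <= t: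
--                     cand = dp[t - c] + 1
--                     if cand < best:
--                         best = cand
--             dp.append(best)
--         return dp[T] <= N
--     return canExact(vals, N, X)
--
-- def canExact(vs, n, t):
--     # vs sorted ascending and distinct: is t a sum of exactly n values from vs?
--     if t < n * vs[0] or n * vs[-1] < t:
--         return False
--     if len(vs) == 1:
--         return t == n * vs[0]
--     return any(canExact(vs[1:], n - x, t - x * vs[0]) for x in range(n + 1))
-- ===== Notes on version B (the rewrite author's own statement) =====
-- stated objective: faster
-- what changed: Replaces A's N-fold breadth-first expansion of the whole reachable set by arithmetic on the shifted target T = X - N*min(vals): a range check, gcd reduction of the positive shifted jump values, then either an unbounded-coin min-coins DP on T (reachable iff mincoins(T) <= N) or, when T is large but the number of per-value count combinations is small, a pruned exact-count enumeration.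
-- intended difference: For N < 0 with nonempty jumps and X = 0, A returns True because range(N) is empty so the start position 0 counts as reached after N jumps; B returns False since a negative number of jumps can reach nothing, which is the intended meaning of 'after exactly N jumps'. — e.g. on canReachCoordinate(-1, [(1, 2)], 0): A returns true, B returns false
import Mathlib
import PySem

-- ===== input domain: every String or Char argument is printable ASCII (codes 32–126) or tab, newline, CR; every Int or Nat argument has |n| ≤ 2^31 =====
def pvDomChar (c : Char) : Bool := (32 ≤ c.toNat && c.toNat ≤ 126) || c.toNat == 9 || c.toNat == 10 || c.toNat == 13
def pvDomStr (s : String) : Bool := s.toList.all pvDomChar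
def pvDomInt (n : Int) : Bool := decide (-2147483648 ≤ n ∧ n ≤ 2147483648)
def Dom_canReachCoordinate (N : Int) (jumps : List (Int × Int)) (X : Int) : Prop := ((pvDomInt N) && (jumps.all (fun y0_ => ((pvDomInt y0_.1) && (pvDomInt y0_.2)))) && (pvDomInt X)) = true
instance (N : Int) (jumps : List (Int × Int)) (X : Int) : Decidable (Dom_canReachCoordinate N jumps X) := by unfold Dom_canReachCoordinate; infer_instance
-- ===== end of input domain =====

-- B replaces A's N-fold breadth-first expansion of the reachable set by arithmetic on the shifted
-- target T = X - N*min: gcd reduction, then a min-coins DP on T or a pruned count enumeration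
-- (objective: faster); for N < 0 B intentionally returns False (see D_).

-- ===== PORT A =====
-- Python's 'set' is modelled here by an ordered set (Std.TreeSet): A builds its sets by insertion
-- and consumes them only through membership (and re-insertion), on which this model is exact —
-- the hash-iteration order of the intermediate sets never influences A's result.
def canReachCoordinate (N : Int) (jumps : List (Int × Int)) (X : Int) : Bool :=
  if N = 0 ∨ jumps = [] then false
  else
    let reach : Std.TreeSet Int compare :=
      (PySem.List.pyRange 0 N 1).foldl (fun reach _ =>
        Std.TreeSet.foldl (fun np pos =>
          jumps.foldl (fun np ab =>
            (np.insert (pos + ab.1)).insert (pos + ab.2)) np)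
          Std.TreeSet.empty reach) (Std.TreeSet.empty.insert 0)
    reach.contains X

-- ===== PORT B =====
-- helper _gcd2 of Source B ('while b: a, b = b, a % b'); b is nonnegative on every reachable call,
-- so Python's loop test 'b != 0' is written as the equivalent '0 < b', making termination evident.
def pygcd (a b : Int) : Int :=
  if h : 0 < b then pygcd b (PySem.Int.mod a b) else a
termination_by b.toNat
decreasing_by
  have hfe : PySem.Int.mod a b = a % b := by
    simp [PySem.Int.mod, Int.fmod_eq_emod, Int.le_of_lt h]
  rw [hfe]
  have h1 := Int.emod_nonneg a (by omega : b ≠ 0)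
  have h2 := Int.emod_lt_of_pos a h
  omega

-- helper canExact of Source B; callers always pass a nonempty sorted list (the [] branch is a
-- totality guard where Python would raise IndexError); 'any' is the or-fold.
def canExact : List Int → Int → Int → Bool
  | [], _, _ => false
  | v :: vs, n, t =>
    if t < n * v ∨ n * (PySem.List.pyGetD (v :: vs) (-1) 0) < t then false
    else if vs = [] then decide (t = n * v)
    else (PySem.List.pyRange 0 (n + 1) 1).foldl
          (fun acc x => acc || canExact vs (n - x) (t - x * v)) false
termination_by vs => vs.length
decreasing_by simp

-- transliteration of Source B's main function: sort the distinct jump values, shift by the minimum,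
-- gcd-reduce the positive shifted coins, then decide via the min-coins DP or via canExact.
-- Python's growing list dp (append / dp[t-c]) is an Array (push / getD); every index t - c is
-- provably in [0, len), where Array.getD and Int.toNat are exact.
def canReachCoordinate_alt (N : Int) (jumps : List (Int × Int)) (X : Int) : Bool :=
  if N ≤ 0 ∨ jumps = [] then false
  else
    let vals : List Int :=
      PySem.List.sorted (PySem.Set.ofList (jumps.flatMap (fun ab => [ab.1, ab.2]))) (fun v => v)
    let m := PySem.List.pyGetD vals 0 0        -- vals[0]  (vals is nonempty: index exact)
    let M := PySem.List.pyGetD vals (-1) 0     -- vals[-1]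
    let T := X - N * m
    if T < 0 ∨ N * (M - m) < T then false
    else
      let coins := (vals.filter (fun v => decide (v ≠ m))).map (fun v => v - m)
      if coins = [] then true
      else
        let g := coins.foldl (fun g c => pygcd g c) 0
        if PySem.Int.mod T g ≠ 0 then false
        else
          let T1 := PySem.Int.floordiv T g
          let coins1 := coins.map (fun c => PySem.Int.floordiv c g)
          let tree := ((PySem.List.pyRange 1 ((vals.length : Int) + 1) 1).foldl
            (fun st i => if st.2 then st
              else ((PySem.Int.floordiv (st.1 * (N + i)) i),
                    decide (2000000 < PySem.Int.floordiv (st.1 * (N + i)) i)))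
            ((1 : Int), false)).1
          if T1 ≤ 2000000 ∨ 2000000 < tree then
            let dp : Array Int :=
              (PySem.List.pyRange 1 (T1 + 1) 1).foldl (fun dp t =>
                dp.push (coins1.foldl (fun best c =>
                  if c ≤ t then
                    (if dp.getD (t - c).toNat 0 + 1 < best then dp.getD (t - c).toNat 0 + 1
                     else best)
                  else best) (N + 1))) #[0]
            decide (dp.getD T1.toNat 0 ≤ N)
          else canExact vals N X

-- ===== PRECONDITION & SPEC =====
-- For N < 0 with nonempty jumps and X = 0, A returns True (range(N) is empty so position 0 counts
-- as reached); B returns False, the intended meaning of "after exactly N jumps" for negative N.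
def D_canReachCoordinate (N : Int) (jumps : List (Int × Int)) (X : Int) : Prop :=
  N < 0 ∧ jumps ≠ [] ∧ X = 0
instance (N : Int) (jumps : List (Int × Int)) (X : Int) : Decidable (D_canReachCoordinate N jumps X) := by unfold D_canReachCoordinate; infer_instance

def Spec_canReachCoordinate (N : Int) (jumps : List (Int × Int)) (X : Int) (out : Bool) : Prop :=
  ¬ D_canReachCoordinate N jumps X → out = canReachCoordinate_alt N jumps X
instance (N : Int) (jumps : List (Int × Int)) (X : Int) (out : Bool) : Decidable (Spec_canReachCoordinate N jumps X out) := by unfold Spec_canReachCoordinate; infer_instance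

def pvDiffWitness_canReachCoordinate : Int × (List (Int × Int)) × Int := (-1, [(1, 2)], 0)
def pvDiffWitnessOut_canReachCoordinate : Bool × Bool := (true, false)

-- ===== CLAIM (what is proved, stated in full; the proofs are below) =====
def Claim_unchanged_canReachCoordinate : Prop := ∀ (N : Int) (jumps : List (Int × Int)) (X : Int), Dom_canReachCoordinate N jumps X → Spec_canReachCoordinate N jumps X (canReachCoordinate N jumps X)
def Claim_changed_canReachCoordinate : Prop := Dom_canReachCoordinate (pvDiffWitness_canReachCoordinate.1) (pvDiffWitness_canReachCoordinate.2.1) (pvDiffWitness_canReachCoordinate.2.2) ∧ D_canReachCoordinate (pvDiffWitness_canReachCoordinate.1) (pvDiffWitness_canReachCoordinate.2.1) (pvDiffWitness_canReachCoordinate.2.2) ∧ canReachCoordinate (pvDiffWitness_canReachCoordinate.1) (pvDiffWitness_canReachCoordinate.2.1) (pvDiffWitness_canReachCoordinate.2.2) = pvDiffWitnessOut_canReachCoordinate.1 ∧ canReachCoordinate_alt (pvDiffWitness_canReachCoordinate.1) (pvDiffWitness_canReachCoordinate.2.1) (pvDiffWitness_canReachCoordinate.2.2) = pvDiffWitnessOut_canReachCoordinate.2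 ∧ pvDiffWitnessOut_canReachCoordinate.1 ≠ pvDiffWitnessOut_canReachCoordinate.2
def Claim_exact_canReachCoordinate : Prop := ∀ (N : Int) (jumps : List (Int × Int)) (X : Int), Dom_canReachCoordinate N jumps X → D_canReachCoordinate N jumps X → canReachCoordinate N jumps X ≠ canReachCoordinate_alt N jumps X

-- ===== LEMMAS AND PROOFS =====

-- "x is the sum of exactly k values drawn (with repetition) from vals"
def RepV (vals : List Int) (k : Nat) (x : Int) : Prop :=
  ∃ l : List Int, (∀ v ∈ l, v ∈ vals) ∧ l.length = k ∧ l.sum = x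

-- "t is the sum of exactly k shifted coins v - m with v ∈ vals, m < v"
def RepC (vals : List Int) (m : Int) (k : Nat) (t : Int) : Prop :=
  ∃ l : List Int, (∀ c ∈ l, ∃ v ∈ vals, m < v ∧ c = v - m) ∧ l.length = k ∧ l.sum = t

-- ---------- A-side characterisation ----------

def stepA (jumps : List (Int × Int)) (s : Std.TreeSet Int compare) : Std.TreeSet Int compare :=
  Std.TreeSet.foldl (fun np pos =>
    jumps.foldl (fun np ab =>
      (np.insert (pos + ab.1)).insert (pos + ab.2)) np)
    Std.TreeSet.empty s

def iterA (jumps : List (Int × Int)) : Nat → Std.TreeSet Int compare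
  | 0 => Std.TreeSet.empty.insert 0
  | n + 1 => stepA jumps (iterA jumps n)

theorem foldl_ignore {α β : Type} (f : α → α) (l : List β) (a : α) :
    l.foldl (fun a _ => f a) a = f^[l.length] a := by
  induction l generalizing a with
  | nil => rfl
  | cons x xs ih => simp [List.foldl, ih, Function.iterate_succ_apply]

theorem mem_innerA (jumps : List (Int × Int)) (pos y : Int) (np : Std.TreeSet Int compare) :
    y ∈ jumps.foldl (fun np ab =>
        (np.insert (pos + ab.1)).insert (pos + ab.2)) np ↔
      y ∈ np ∨ ∃ ab ∈ jumps, pos + ab.1 = y ∨ pos + ab.2 = y := by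
  induction jumps generalizing np with
  | nil => simp
  | cons ab rest ih =>
    simp only [List.foldl, ih, Std.TreeSet.mem_insert,
      Std.LawfulEqCmp.compare_eq_iff_eq, List.mem_cons]
    constructor
    · rintro ((h | h | h) | ⟨c, hc, h⟩)
      · exact Or.inr ⟨ab, Or.inl rfl, Or.inr h⟩
      · exact Or.inr ⟨ab, Or.inl rfl, Or.inl h⟩
      · exact Or.inl h
      · exact Or.inr ⟨c, Or.inr hc, h⟩
    · rintro (h | ⟨c, (rfl | hc), h⟩)
      · exact Or.inl (Or.inr (Or.inr h))
      · rcases h with h | h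
        · exact Or.inl (Or.inr (Or.inl h))
        · exact Or.inl (Or.inl h)
      · exact Or.inr ⟨c, hc, h⟩

theorem mem_outerA (jumps : List (Int × Int)) (y : Int) (l : List Int)
    (init : Std.TreeSet Int compare) :
    y ∈ l.foldl (fun np pos =>
        jumps.foldl (fun np ab =>
          (np.insert (pos + ab.1)).insert (pos + ab.2)) np) init ↔
      y ∈ init ∨ ∃ p ∈ l, ∃ ab ∈ jumps, p + ab.1 = y ∨ p + ab.2 = y := by
  induction l generalizing init with
  | nil => simp
  | cons p rest ih =>
    simp only [List.foldl, ih, mem_innerA, List.mem_cons]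
    constructor
    · rintro ((h | h) | ⟨q, hq, h⟩)
      · exact Or.inl h
      · exact Or.inr ⟨p, Or.inl rfl, h⟩
      · exact Or.inr ⟨q, Or.inr hq, h⟩
    · rintro (h | ⟨q, (rfl | hq), h⟩)
      · exact Or.inl (Or.inl h)
      · exact Or.inl (Or.inr h)
      · exact Or.inr ⟨q, hq, h⟩

theorem mem_stepA (jumps : List (Int × Int)) (s : Std.TreeSet Int compare) (y : Int) :
    y ∈ stepA jumps s ↔ ∃ p ∈ s, ∃ ab ∈ jumps, p + ab.1 = y ∨ p + ab.2 = y := by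
  unfold stepA
  rw [Std.TreeSet.foldl_eq_foldl_toList, mem_outerA]
  constructor
  · rintro (h | ⟨p, hp, hrest⟩)
    · exact absurd h (by simp)
    · exact ⟨p, Std.TreeSet.mem_toList.mp hp, hrest⟩
  · rintro ⟨p, hp, hrest⟩
    exact Or.inr ⟨p, Std.TreeSet.mem_toList.mpr hp, hrest⟩

theorem mem_iterA (jumps : List (Int × Int)) (n : Nat) (y : Int) :
    y ∈ iterA jumps n ↔ RepV (jumps.flatMap (fun ab => [ab.1, ab.2])) n y := by
  induction n generalizing y with
  | zero =>
    simp only [iterA, RepV]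
    constructor
    · intro h
      have h0 : (0 : Int) = y := by
        simpa [Std.TreeSet.mem_insert, Std.LawfulEqCmp.compare_eq_iff_eq] using h
      exact ⟨[], by simp, rfl, by simp [← h0]⟩
    · rintro ⟨l, -, hl, hs⟩
      rw [List.length_eq_zero_iff] at hl
      subst hl
      simp only [List.sum_nil] at hs
      simp [Std.TreeSet.mem_insert, Std.LawfulEqCmp.compare_eq_iff_eq, ← hs]
  | succ n ih =>
    simp only [iterA, mem_stepA]
    constructor
    · rintro ⟨p, hp, ab, hab, h⟩
      rcases (ih p).mp hp with ⟨l, hmem, hlen, hsum⟩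
      rcases h with rfl | rfl
      · exact ⟨ab.1 :: l, by
          intro v hv
          rcases List.mem_cons.mp hv with rfl | hv
          · exact List.mem_flatMap.mpr ⟨ab, hab, by simp⟩
          · exact hmem v hv, by simp [hlen], by simp [hsum]; ring⟩
      · exact ⟨ab.2 :: l, by
          intro v hv
          rcases List.mem_cons.mp hv with rfl | hv
          · exact List.mem_flatMap.mpr ⟨ab, hab, by simp⟩
          · exact hmem v hv, by simp [hlen], by simp [hsum]; ring⟩
    · rintro ⟨l, hmem, hlen, hsum⟩
      cases l with
      | nil => simp at hlen
      | cons v rest =>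
        have hv : v ∈ jumps.flatMap (fun ab => [ab.1, ab.2]) := hmem v (by simp)
        rcases List.mem_flatMap.mp hv with ⟨ab, hab, hvab⟩
        have hrest : rest.sum = y - v := by simp at hsum; omega
        have hp : (y - v) ∈ iterA jumps n := (ih (y - v)).mpr
          ⟨rest, fun w hw => hmem w (by simp [hw]), by simpa using hlen, hrest⟩
        refine ⟨y - v, hp, ab, hab, ?_⟩
        simp at hvab
        rcases hvab with rfl | rfl
        · exact Or.inl (by ring)
        · exact Or.inr (by ring)

-- ---------- generic min-fold characterisation ----------

def minFold (l : List Int) (q : Int → Prop) [DecidablePred q] (g : Int → Int) (b0 : Int) : Int :=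
  l.foldl (fun best v => if q v then (if g v < best then g v else best) else best) b0

theorem minFold_le_init (l : List Int) (q : Int → Prop) [DecidablePred q] (g : Int → Int)
    (b0 : Int) : minFold l q g b0 ≤ b0 := by
  induction l generalizing b0 with
  | nil => simp [minFold]
  | cons v rest ih =>
    simp only [minFold, List.foldl]
    split_ifs with h1 h2
    · exact le_trans (ih _) (le_of_lt h2)
    · exact ih _
    · exact ih _

theorem minFold_le (l : List Int) (q : Int → Prop) [DecidablePred q] (g : Int → Int)
    (b0 : Int) (v : Int) (hv : v ∈ l) (hq : q v) : minFold l q g b0 ≤ g v := by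
  induction l generalizing b0 with
  | nil => simp at hv
  | cons w rest ih =>
    simp only [minFold, List.foldl]
    rcases List.mem_cons.mp hv with rfl | hv'
    · simp only [if_pos hq]
      split_ifs with h2
      · exact minFold_le_init _ _ _ _
      · exact le_trans (minFold_le_init _ _ _ _) (not_lt.mp h2)
    · split_ifs <;> exact ih _ hv'

theorem minFold_cases (l : List Int) (q : Int → Prop) [DecidablePred q] (g : Int → Int)
    (b0 : Int) : minFold l q g b0 = b0 ∨ ∃ v ∈ l, q v ∧ minFold l q g b0 = g v := by
  induction l generalizing b0 with
  | nil => exact Or.inl rfl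
  | cons w rest ih =>
    simp only [minFold, List.foldl]
    split_ifs with h1 h2
    · rcases ih (g w) with h | ⟨v, hv, hq, h⟩
      · exact Or.inr ⟨w, by simp, h1, h⟩
      · exact Or.inr ⟨v, by simp [hv], hq, h⟩
    · rcases ih b0 with h | ⟨v, hv, hq, h⟩
      · exact Or.inl h
      · exact Or.inr ⟨v, by simp [hv], hq, h⟩
    · rcases ih b0 with h | ⟨v, hv, hq, h⟩
      · exact Or.inl h
      · exact Or.inr ⟨v, by simp [hv], hq, h⟩

-- ---------- B-side DP ----------

def dpStep (coins : List Int) (N : Int) (dp : Array Int) (t : Int) : Array Int :=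
  dp.push (coins.foldl (fun best c =>
    if c ≤ t then
      (if dp.getD (t - c).toNat 0 + 1 < best then dp.getD (t - c).toNat 0 + 1
       else best)
    else best) (N + 1))

def dpF (coins : List Int) (N : Int) : Nat → Array Int
  | 0 => #[0]
  | j + 1 => dpStep coins N (dpF coins N j) ((j : Int) + 1)

theorem array_getD_toList {α : Type} (a : Array α) (i : Nat) (d : α) :
    a.getD i d = a.toList.getD i d := by
  rw [Array.getD_eq_getD_getElem?, List.getD_eq_getElem?_getD, Array.getElem?_toList]

theorem length_dpF (coins : List Int) (N : Int) (j : Nat) :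
    (dpF coins N j).toList.length = j + 1 := by
  induction j with
  | zero => rfl
  | succ j ih => simp [dpF, dpStep, ih]

theorem fold_pyRange_dp (coins : List Int) (N : Int) (u : Nat) :
    (PySem.List.pyRange 1 ((u : Int) + 1) 1).foldl (dpStep coins N) #[0] = dpF coins N u := by
  induction u with
  | zero => simp [PySem.List.pyRange_one_eq_nil, dpF]
  | succ u ih =>
    have h : (1 : Int) ≤ (u : Int) + 1 := by omega
    have := PySem.List.pyRange_one_succ_right (a := 1) (b := (u : Int) + 1) h
    push_cast
    rw [show ((u : Int) + 1 + 1) = ((u : Int) + 1) + 1 by ring, this, List.foldl_append, ih]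
    rfl

def Good (coins : List Int) (N : Int) (s : Nat) (e : Int) : Prop :=
  0 ≤ e ∧ e ≤ N + 1 ∧ (e ≤ N → RepV coins e.toNat (s : Int)) ∧
    ∀ k : Nat, RepV coins k (s : Int) → e ≤ (k : Int)

theorem dpF_good (coins : List Int) (N : Int) (hN : 1 ≤ N) (hpos : ∀ c ∈ coins, 0 < c) :
    ∀ j : Nat, ∀ s : Nat, s ≤ j → Good coins N s ((dpF coins N j).toList.getD s 0) := by
  intro j
  induction j with
  | zero =>
    intro s hs
    have hs0 : s = 0 := by omega
    subst hs0
    have he : (dpF coins N 0).toList.getD 0 0 = 0 := by simp [dpF]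
    rw [he]
    exact ⟨le_refl 0, by omega, fun _ => ⟨[], by simp, by simp, by simp⟩,
      fun k _ => Int.natCast_nonneg k⟩
  | succ j ih =>
    intro s hs
    have hlen := length_dpF coins N j
    rcases Nat.lt_or_ge s (j + 1) with hlt | hge
    · have heq : (dpF coins N (j + 1)).toList.getD s 0 = (dpF coins N j).toList.getD s 0 := by
        show (dpStep coins N (dpF coins N j) ((j : Int) + 1)).toList.getD s 0 = _
        unfold dpStep
        rw [Array.toList_push, List.getD_append _ _ _ s (by omega)]
      rw [heq]
      exact ih s (by omega)
    · have hs' : s = j + 1 := by omega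
      subst hs'
      have heq : (dpF coins N (j + 1)).toList.getD (j + 1) 0 =
          minFold coins (fun c => c ≤ (j : Int) + 1)
            (fun c => (dpF coins N j).getD (((j : Int) + 1) - c).toNat 0 + 1)
            (N + 1) := by
        show (dpStep coins N (dpF coins N j) ((j : Int) + 1)).toList.getD (j + 1) 0 = _
        unfold dpStep minFold
        rw [Array.toList_push, List.getD_append_right _ _ _ _ (by omega)]
        simp [hlen]
      rw [heq]
      set q : Int → Prop := fun c => c ≤ (j : Int) + 1 with hq
      set g : Int → Int :=
        fun c => (dpF coins N j).getD (((j : Int) + 1) - c).toNat 0 + 1 with hg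
      set b := minFold coins q g (N + 1) with hb
      have hcases := minFold_cases coins q g (N + 1)
      have hub := fun v hv hqv => minFold_le coins q g (N + 1) v hv hqv
      have hinit := minFold_le_init coins q g (N + 1)
      have hgood : ∀ c : Int, c ∈ coins → q c →
          Good coins N (((j : Int) + 1 - c).toNat)
            ((dpF coins N j).toList.getD (((j : Int) + 1 - c).toNat) 0) ∧
          g c = (dpF coins N j).toList.getD (((j : Int) + 1 - c).toNat) 0 + 1 := by
        intro c hcm hqc
        have hcpos := hpos c hcm
        refine ⟨ih _ (by omega), ?_⟩
        simp only [hg]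
        rw [array_getD_toList]
      refine ⟨?_, hinit, ?_, ?_⟩
      · rcases hcases with hb1 | ⟨v, hv, hqv, hbg⟩
        · omega
        · obtain ⟨⟨hge0, -, -, -⟩, hgv⟩ := hgood v hv hqv
          omega
      · intro hbN
        rcases hcases with hb1 | ⟨v, hv, hqv, hbg⟩
        · exfalso; omega
        · obtain ⟨⟨hge0, -, hrep, -⟩, hgv⟩ := hgood v hv hqv
          have hvpos := hpos v hv
          have hvle : v ≤ (j : Int) + 1 := hqv
          have hiT : (((((j : Int) + 1 - v).toNat : Nat)) : Int) = (j : Int) + 1 - v :=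
            Int.toNat_of_nonneg (by omega)
          obtain ⟨l, hmem, hlenl, hsuml⟩ := hrep (by omega)
          refine ⟨v :: l, ?_, ?_, ?_⟩
          · intro c hc
            rcases List.mem_cons.mp hc with rfl | hc
            · exact hv
            · exact hmem c hc
          · simp only [List.length_cons, hlenl]
            omega
          · simp only [List.sum_cons, hsuml]
            push_cast
            omega
      · intro k hrepk
        obtain ⟨l, hmem, hlenl, hsuml⟩ := hrepk
        cases l with
        | nil =>
          exfalso
          simp only [List.sum_nil] at hsuml
          omega
        | cons c rest =>
          have hcm : c ∈ coins := hmem c (by simp)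
          have hcpos := hpos c hcm
          have hrest_nonneg : 0 ≤ rest.sum := List.sum_nonneg (fun x hx =>
            le_of_lt (hpos x (hmem x (by simp [hx]))))
          have hsum2 : c + rest.sum = (j : Int) + 1 := by
            simp only [List.sum_cons] at hsuml
            push_cast at hsuml
            omega
          have hqc : q c := by rw [hq]; omega
          obtain ⟨⟨-, -, -, hmin'⟩, hgc⟩ := hgood c hcm hqc
          have hiT : (((((j : Int) + 1 - c).toNat : Nat)) : Int) = (j : Int) + 1 - c :=
            Int.toNat_of_nonneg (by omega)
          have hrepr : RepV coins rest.length ((((j : Int) + 1 - c).toNat : Int)) := by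
            refine ⟨rest, fun x hx => hmem x (by simp [hx]), rfl, ?_⟩
            rw [hiT]; omega
          have h1 := hmin' rest.length hrepr
          have h2 := hub c hcm hqc
          have h3 : (k : Int) = (rest.length : Int) + 1 := by
            simp only [List.length_cons] at hlenl
            omega
          omega

-- ---------- sum helpers ----------

theorem sum_map_sub (l : List Int) (m : Int) :
    (l.map (fun v => v - m)).sum = l.sum - l.length * m := by
  induction l with
  | nil => simp
  | cons v rest ih => simp [ih]; ring

theorem sum_map_add (l : List Int) (m : Int) :
    (l.map (fun v => v + m)).sum = l.sum + l.length * m := by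
  induction l with
  | nil => simp
  | cons v rest ih => simp [ih]; ring

theorem sum_le_length_mul (l : List Int) (B : Int) (h : ∀ x ∈ l, x ≤ B) :
    l.sum ≤ l.length * B := by
  induction l with
  | nil => simp
  | cons v rest ih =>
    have h1 := h v (by simp)
    have h2 := ih (fun x hx => h x (by simp [hx]))
    simp only [List.sum_cons, List.length_cons]
    push_cast
    nlinarith

theorem sum_ge_length_mul (l : List Int) (B : Int) (h : ∀ x ∈ l, B ≤ x) :
    (l.length : Int) * B ≤ l.sum := by
  induction l with
  | nil => simp
  | cons v rest ih =>
    have h1 := h v (by simp)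
    have h2 := ih (fun x hx => h x (by simp [hx]))
    simp only [List.sum_cons, List.length_cons]
    push_cast
    nlinarith

theorem sum_filter_pos (l : List Int) (h : ∀ x ∈ l, 0 ≤ x) :
    (l.filter (fun c => decide (0 < c))).sum = l.sum := by
  induction l with
  | nil => simp
  | cons v rest ih =>
    have h1 := h v (by simp)
    have h2 := ih (fun x hx => h x (by simp [hx]))
    by_cases hv : 0 < v
    · simp [List.filter_cons, hv, h2]
    · have hv0 : v = 0 := by omega
      simp [List.filter_cons, hv, h2, hv0]

-- ---------- the bridge ----------

theorem repV_iff_repC (vals : List Int) (m M N : Int) (hm : m ∈ vals)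
    (hmin : ∀ v ∈ vals, m ≤ v) (hmax : ∀ v ∈ vals, v ≤ M) (hN : 0 < N) (X : Int) :
    RepV vals N.toNat X ↔
      (0 ≤ X - N * m ∧ X - N * m ≤ N * (M - m) ∧
        ∃ k : Nat, k ≤ N.toNat ∧ RepC vals m k (X - N * m)) := by
  have hNc : ((N.toNat : Int)) = N := Int.toNat_of_nonneg (by omega)
  constructor
  · rintro ⟨l, hmem, hlen, hsum⟩
    have hlen' : ((l.length : Int)) = N := by rw [hlen, hNc]
    have hsub : (l.map (fun v => v - m)).sum = X - N * m := by
      rw [sum_map_sub, hsum, hlen']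
    have hpos : ∀ x ∈ l.map (fun v => v - m), 0 ≤ x := by
      intro x hx
      obtain ⟨v, hv, rfl⟩ := List.mem_map.mp hx
      have := hmin v (hmem v hv); omega
    have h0 : 0 ≤ X - N * m := hsub ▸ List.sum_nonneg hpos
    have h1 : X - N * m ≤ N * (M - m) := by
      have hle := sum_le_length_mul (l.map (fun v => v - m)) (M - m) (by
        intro x hx
        obtain ⟨v, hv, rfl⟩ := List.mem_map.mp hx
        have := hmax v (hmem v hv); omega)
      rw [hsub] at hle
      simpa [hlen, hNc] using hle
    refine ⟨h0, h1, ((l.map (fun v => v - m)).filter (fun c => decide (0 < c))).length, ?_, ?_⟩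
    · calc ((l.map (fun v => v - m)).filter (fun c => decide (0 < c))).length
          ≤ (l.map (fun v => v - m)).length := List.length_filter_le _ _
        _ = N.toNat := by simp [hlen]
    · refine ⟨_, ?_, rfl, ?_⟩
      · intro c hc
        have hc' := List.mem_filter.mp hc
        obtain ⟨v, hv, rfl⟩ := List.mem_map.mp hc'.1
        have hcpos : (0 : Int) < v - m := by simpa using hc'.2
        exact ⟨v, hmem v hv, by omega, rfl⟩
      · rw [sum_filter_pos _ hpos, hsub]
  · rintro ⟨h0, h1, k, hk, l, hmem, hlen, hsum⟩
    refine ⟨l.map (fun c => c + m) ++ List.replicate (N.toNat - k) m, ?_, ?_, ?_⟩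
    · intro v hv
      rcases List.mem_append.mp hv with hv | hv
      · obtain ⟨c, hc, rfl⟩ := List.mem_map.mp hv
        obtain ⟨w, hw, hmw, rfl⟩ := hmem c hc
        have hwm : w - m + m = w := by ring
        rw [hwm]; exact hw
      · rw [List.eq_of_mem_replicate hv]; exact hm
    · simp only [List.length_append, List.length_map, List.length_replicate, hlen]
      omega
    · rw [List.sum_append, sum_map_add, List.sum_replicate, hlen, hsum, nsmul_eq_mul]
      have hcast : ((N.toNat - k : Nat) : Int) = N - (k : Int) := by
        rw [Nat.cast_sub hk, hNc]
      rw [hcast]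
      ring

-- RepC over vals is the same as RepV over the shifted coin list of Source B
theorem repC_iff_coins0 (vals : List Int) (m : Int) (hmin : ∀ v ∈ vals, m ≤ v) (k : Nat)
    (t : Int) :
    RepC vals m k t ↔
      RepV ((vals.filter (fun v => decide (v ≠ m))).map (fun v => v - m)) k t := by
  have hmem : ∀ c : Int,
      (∃ v ∈ vals, m < v ∧ c = v - m) ↔
        c ∈ (vals.filter (fun v => decide (v ≠ m))).map (fun v => v - m) := by
    intro c
    simp only [List.mem_map, List.mem_filter, decide_eq_true_eq]
    constructor
    · rintro ⟨v, hv, hlt, rfl⟩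
      exact ⟨v, ⟨hv, by omega⟩, rfl⟩
    · rintro ⟨v, ⟨hv, hne⟩, rfl⟩
      have := hmin v hv
      exact ⟨v, hv, by omega, rfl⟩
  constructor
  · rintro ⟨l, hl, h2, h3⟩
    exact ⟨l, fun c hc => (hmem c).mp (hl c hc), h2, h3⟩
  · rintro ⟨l, hl, h2, h3⟩
    exact ⟨l, fun c hc => (hmem c).mpr (hl c hc), h2, h3⟩

-- ---------- gcd reduction ----------

theorem pygcd_spec : ∀ (n : Nat) (a b : Int), 0 ≤ a → 0 ≤ b → b.toNat = n →
    (pygcd a b ∣ a ∧ pygcd a b ∣ b ∧ 0 ≤ pygcd a b ∧ ((0 < a ∨ 0 < b) → 0 < pygcd a b)) := by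
  intro n
  induction n using Nat.strong_induction_on with
  | _ n ih =>
    intro a b ha hb hbn
    rw [pygcd]
    split_ifs with h
    · have hfe : PySem.Int.mod a b = a % b := by
        simp [PySem.Int.mod, Int.fmod_eq_emod, Int.le_of_lt h]
      have hr0 : 0 ≤ a % b := Int.emod_nonneg a (by omega)
      have hrb : a % b < b := Int.emod_lt_of_pos a h
      have hrec := ih ((a % b).toNat) (by omega) b (a % b) (by omega) hr0 rfl
      rw [hfe]
      obtain ⟨d1, d2, d3, d4⟩ := hrec
      refine ⟨?_, d1, d3, fun _ => d4 (Or.inl h)⟩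
      have ha' : a = b * (a / b) + a % b := by
        rw [Int.emod_def]; ring
      have h2 : pygcd b (a % b) ∣ b * (a / b) + a % b :=
        dvd_add (dvd_mul_of_dvd_left d1 _) d2
      rwa [← ha'] at h2
    · have hb0 : b = 0 := by omega
      subst hb0
      exact ⟨dvd_refl a, dvd_zero a, ha, fun hc => by rcases hc with hc | hc <;> omega⟩

theorem fold_pygcd_dvd_init (l : List Int) (hpos : ∀ c ∈ l, 0 < c) :
    ∀ a : Int, 0 ≤ a → l.foldl (fun g c => pygcd g c) a ∣ a := by
  induction l with
  | nil => intro a _; simp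
  | cons c rest ih =>
    intro a ha
    have hc := hpos c (by simp)
    obtain ⟨g1, g2, g3, g4⟩ := pygcd_spec c.toNat a c ha (le_of_lt hc) rfl
    simp only [List.foldl]
    exact dvd_trans (ih (fun x hx => hpos x (by simp [hx])) (pygcd a c) g3) g1

theorem fold_pygcd (l : List Int) (hpos : ∀ c ∈ l, 0 < c) :
    ∀ a : Int, 0 ≤ a →
      ((∀ c ∈ l, l.foldl (fun g c => pygcd g c) a ∣ c) ∧
        0 ≤ l.foldl (fun g c => pygcd g c) a ∧
        ((0 < a ∨ l ≠ []) → 0 < l.foldl (fun g c => pygcd g c) a)) := by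
  induction l with
  | nil =>
    intro a ha
    refine ⟨by simp, ha, ?_⟩
    rintro (h | h)
    · simpa using h
    · exact absurd rfl h
  | cons c rest ih =>
    intro a ha
    have hc := hpos c (by simp)
    obtain ⟨g1, g2, g3, g4⟩ := pygcd_spec c.toNat a c ha (le_of_lt hc) rfl
    obtain ⟨i1, i2, i3⟩ := ih (fun x hx => hpos x (by simp [hx])) (pygcd a c) g3
    simp only [List.foldl]
    refine ⟨?_, i2, fun _ => i3 (Or.inl (g4 (Or.inr hc)))⟩
    intro x hx
    rcases List.mem_cons.mp hx with rfl | hx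
    · exact dvd_trans
        (fold_pygcd_dvd_init rest (fun y hy => hpos y (by simp [hy])) (pygcd a x) g3) g2
    · exact i1 x hx

theorem mod_zero_iff (T g : Int) (hg : 0 < g) : PySem.Int.mod T g = 0 ↔ g ∣ T := by
  have hfe : PySem.Int.mod T g = T % g := by
    simp [PySem.Int.mod, Int.fmod_eq_emod, Int.le_of_lt hg]
  rw [hfe]
  exact ⟨Int.dvd_of_emod_eq_zero, Int.emod_eq_zero_of_dvd⟩

theorem fdiv_exact (g c : Int) (hg : g ≠ 0) (h : g ∣ c) :
    g * (PySem.Int.floordiv c g) = c := by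
  obtain ⟨k, rfl⟩ := h
  simp only [PySem.Int.floordiv]
  rw [Int.mul_fdiv_cancel_left _ hg]

theorem sum_map_fdiv (l : List Int) (g : Int) (hg : g ≠ 0) (h : ∀ c ∈ l, g ∣ c) :
    g * (l.map (fun c => PySem.Int.floordiv c g)).sum = l.sum := by
  induction l with
  | nil => simp
  | cons c rest ih =>
    have h1 := fdiv_exact g c hg (h c (by simp))
    have h2 := ih (fun x hx => h x (by simp [hx]))
    simp only [List.map_cons, List.sum_cons]
    rw [mul_add, h1, h2]

theorem repV_scale (coins0 : List Int) (g : Int) (hg : 0 < g)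
    (hdvd : ∀ c ∈ coins0, g ∣ c) (k : Nat) (T0 T1 : Int) (hT : T0 = g * T1) :
    RepV coins0 k T0 ↔ RepV (coins0.map (fun c => PySem.Int.floordiv c g)) k T1 := by
  constructor
  · rintro ⟨l, hmem, hlen, hsum⟩
    refine ⟨l.map (fun c => PySem.Int.floordiv c g), ?_, by simp [hlen], ?_⟩
    · intro c hc
      obtain ⟨c0, hc0, rfl⟩ := List.mem_map.mp hc
      exact List.mem_map.mpr ⟨c0, hmem c0 hc0, rfl⟩
    · have := sum_map_fdiv l g (by omega) (fun c hc => hdvd c (hmem c hc))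
      rw [hsum, hT] at this
      exact mul_left_cancel₀ (by omega : g ≠ 0) this
  · rintro ⟨l, hmem, hlen, hsum⟩
    refine ⟨l.map (fun c => g * c), ?_, by simp [hlen], ?_⟩
    · intro c hc
      obtain ⟨c1, hc1, rfl⟩ := List.mem_map.mp hc
      obtain ⟨c0, hc0, rfl⟩ := List.mem_map.mp (hmem c1 hc1)
      rw [fdiv_exact g c0 (by omega) (hdvd c0 hc0)]
      exact hc0
    · have hmul : (l.map (fun c => g * c)).sum = g * l.sum := by
        rw [List.sum_map_mul_left l (fun c => c) g, List.map_id']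
      rw [hmul, hsum, hT]

-- ---------- the exact-count enumeration (canExact) ----------

theorem head_le_of_pairwise_lt (v : Int) (l : List Int)
    (h : (v :: l).Pairwise (· < ·)) : ∀ w ∈ v :: l, v ≤ w := by
  intro w hw
  rcases List.mem_cons.mp hw with rfl | hw
  · exact le_refl w
  · exact le_of_lt ((List.pairwise_cons.mp h).1 w hw)

theorem le_getLast_of_pairwise_lt : ∀ (l : List Int), l.Pairwise (· < ·) → ∀ (hne : l ≠ []),
    ∀ w ∈ l, w ≤ l.getLast hne := by
  intro l
  induction l with
  | nil => intro _ hne; exact absurd rfl hne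
  | cons v rest ih =>
    intro h hne w hw
    cases rest with
    | nil =>
      simp only [List.mem_singleton] at hw
      simp [hw]
    | cons r rs =>
      have hne' : (r :: rs : List Int) ≠ [] := by simp
      rw [List.getLast_cons hne']
      rcases List.mem_cons.mp hw with rfl | hw'
      · exact le_of_lt ((List.pairwise_cons.mp h).1 _ (List.getLast_mem hne'))
      · exact ih (List.pairwise_cons.mp h).2 hne' w hw'

theorem foldl_or (f : Int → Bool) (l : List Int) :
    ∀ acc : Bool, l.foldl (fun acc x => acc || f x) acc = (acc || l.any f) := by
  induction l with
  | nil => intro acc; simp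
  | cons x xs ih =>
    intro acc
    simp only [List.foldl, List.any_cons, ih]
    cases acc <;> simp [Bool.or_assoc]

theorem sum_const_val (l : List Int) (v : Int) (h : ∀ w ∈ l, w = v) :
    l.sum = l.length * v := by
  induction l with
  | nil => simp
  | cons w rest ih =>
    have h1 := h w (by simp)
    have h2 := ih (fun x hx => h x (by simp [hx]))
    simp only [List.sum_cons, List.length_cons, h1, h2]
    push_cast
    ring

theorem rep_singleton (v : Int) (k : Nat) (t : Int) : RepV [v] k t ↔ t = (k : Int) * v := by
  constructor
  · rintro ⟨l, hmem, hlen, hsum⟩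
    have : l.sum = l.length * v := sum_const_val l v (fun w hw => by simpa using hmem w hw)
    rw [hsum, hlen] at this
    exact this
  · rintro rfl
    refine ⟨List.replicate k v, ?_, by simp, by simp [List.sum_replicate, nsmul_eq_mul]⟩
    intro w hw
    simp [List.eq_of_mem_replicate hw]

theorem filter_ne_length (l : List Int) (v : Int) :
    (l.filter (fun w => decide (w ≠ v))).length + l.count v = l.length := by
  induction l with
  | nil => simp
  | cons w rest ih =>
    by_cases hw : w = v
    · subst hw
      rw [List.filter_cons_of_neg (by simp), List.count_cons_self, List.length_cons]
      omega
    · rw [List.filter_cons_of_pos (by simp [hw]), List.count_cons_of_ne hw, List.length_cons,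
        List.length_cons]
      omega

theorem filter_ne_sum (l : List Int) (v : Int) :
    (l.filter (fun w => decide (w ≠ v))).sum + (l.count v : Int) * v = l.sum := by
  induction l with
  | nil => simp
  | cons w rest ih =>
    by_cases hw : w = v
    · subst hw
      rw [List.filter_cons_of_neg (by simp), List.count_cons_self, List.sum_cons]
      push_cast
      linear_combination ih
    · rw [List.filter_cons_of_pos (by simp [hw]), List.count_cons_of_ne hw, List.sum_cons,
        List.sum_cons]
      linear_combination ih

theorem canExact_iff : ∀ (vs : List Int), vs.Pairwise (· < ·) → vs ≠ [] →
    ∀ (n t : Int), 0 ≤ n → (canExact vs n t = true ↔ RepV vs n.toNat t) := by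
  intro vs
  induction vs with
  | nil => intro _ hne; exact absurd rfl hne
  | cons v vs' ih =>
    intro hs _ n t hn
    have hnc : ((n.toNat : Nat) : Int) = n := Int.toNat_of_nonneg hn
    cases hvs' : vs' with
    | nil =>
      subst hvs'
      rw [canExact]
      rw [PySem.List.pyGetD_neg_one _ _ (by simp)]
      have hlast : ([v] : List Int).getLast (by simp) = v := rfl
      rw [hlast]
      rw [rep_singleton v n.toNat t, hnc]
      split_ifs with hpr hq
      · constructor
        · intro h; exact absurd h (by simp)
        · intro h; rcases hpr with h1 | h1 <;> omega
      · rw [decide_eq_true_iff]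
      · exact absurd rfl hq
    | cons v2 rs =>
      have hne' : vs' ≠ [] := by rw [hvs']; simp
      rw [canExact]
      rw [← hvs']
      rw [PySem.List.pyGetD_neg_one _ _ (List.cons_ne_nil v vs')]
      rw [if_neg hne']
      set Mv := (v :: vs').getLast (List.cons_ne_nil v vs') with hMv
      have hbounds : RepV (v :: vs') n.toNat t → n * v ≤ t ∧ t ≤ n * Mv := by
        rintro ⟨l, hmem, hlen, hsum⟩
        have hlow := sum_ge_length_mul l v
          (fun x hx => head_le_of_pairwise_lt v vs' hs x (hmem x hx))
        have hhigh := sum_le_length_mul l Mv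
          (fun x hx => le_getLast_of_pairwise_lt _ hs (List.cons_ne_nil v vs') x (hmem x hx))
        rw [hsum, hlen, hnc] at hlow hhigh
        exact ⟨hlow, hhigh⟩
      split_ifs with hpr
      · constructor
        · intro h; exact absurd h (by simp)
        · intro h
          have := hbounds h
          omega
      · rw [foldl_or, Bool.false_or, List.any_eq_true]
        constructor
        · rintro ⟨x, hx, hcx⟩
          have hxr := PySem.List.mem_pyRange_one.mp hx
          have hx0 : 0 ≤ x := hxr.1
          have hxn : x ≤ n := by have := hxr.2; omega
          have hrep := (ih (List.pairwise_cons.mp hs).2 hne' (n - x) (t - x * v)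
            (by omega)).mp hcx
          -- rebuild: x copies of v plus the rest
          obtain ⟨l, hmem, hlen, hsum⟩ := hrep
          refine ⟨List.replicate x.toNat v ++ l, ?_, ?_, ?_⟩
          · intro w hw
            rcases List.mem_append.mp hw with hw | hw
            · simp [List.eq_of_mem_replicate hw]
            · exact List.mem_cons_of_mem v (hmem w hw)
          · simp only [List.length_append, List.length_replicate, hlen]
            omega
          · rw [List.sum_append, List.sum_replicate, nsmul_eq_mul, hsum,
              Int.toNat_of_nonneg hx0]
            ring
        · rintro hrep
          obtain ⟨l, hmem, hlen, hsum⟩ := hrep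
          refine ⟨(l.count v : Int), ?_, ?_⟩
          · rw [PySem.List.mem_pyRange_one]
            have hcle : l.count v ≤ l.length := List.count_le_length
            constructor
            · exact Int.natCast_nonneg _
            · rw [hlen] at hcle
              omega
          · set x : Int := (l.count v : Int) with hx
            have hx0 : 0 ≤ x := Int.natCast_nonneg _
            have hcle : l.count v ≤ l.length := List.count_le_length
            apply (ih (List.pairwise_cons.mp hs).2 hne' (n - x) (t - x * v) (by
              rw [hx, hlen] at *
              omega)).mpr
            have hvnotin : v ∉ vs' := by
              intro hv
              have := (List.pairwise_cons.mp hs).1 v hv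
              omega
            refine ⟨l.filter (fun w => decide (w ≠ v)), ?_, ?_, ?_⟩
            · intro w hw
              have hw' := List.mem_filter.mp hw
              have hwv : w ≠ v := by simpa using hw'.2
              rcases List.mem_cons.mp (hmem w hw'.1) with rfl | h
              · exact absurd rfl hwv
              · exact h
            · have := filter_ne_length l v
              rw [hlen] at this
              omega
            · have := filter_ne_sum l v
              rw [hsum] at this
              rw [hx]
              omega

-- ---------- assembling the equivalence for N > 0 ----------

theorem bool_eq_iff (a b : Bool) (h : (a = true) ↔ (b = true)) : a = b := by
  cases a <;> cases b <;> simp_all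

theorem iterate_stepA (jumps : List (Int × Int)) (n : Nat) :
    (stepA jumps)^[n] (Std.TreeSet.empty.insert 0) = iterA jumps n := by
  induction n with
  | zero => rfl
  | succ n ih => rw [Function.iterate_succ_apply', ih]; rfl

theorem repV_congr (l l' : List Int) (h : ∀ v : Int, v ∈ l ↔ v ∈ l') (k : Nat) (x : Int) :
    RepV l k x ↔ RepV l' k x := by
  constructor
  · rintro ⟨t, ht, h2, h3⟩
    exact ⟨t, fun v hv => (h v).mp (ht v hv), h2, h3⟩
  · rintro ⟨t, ht, h2, h3⟩
    exact ⟨t, fun v hv => (h v).mpr (ht v hv), h2, h3⟩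

theorem main_pos (N : Int) (jumps : List (Int × Int)) (X : Int) (hN : 0 < N)
    (hj : jumps ≠ []) : canReachCoordinate N jumps X = canReachCoordinate_alt N jumps X := by
  have hNc : ((N.toNat : Int)) = N := Int.toNat_of_nonneg (by omega)
  obtain ⟨x0, hx0⟩ : ∃ x : Int, x ∈ jumps.flatMap (fun ab => [ab.1, ab.2]) := by
    cases jumps with
    | nil => exact absurd rfl hj
    | cons ab r => exact ⟨ab.1, by simp⟩
  have hstep : (fun (reach : Std.TreeSet Int compare) (_ : Int) =>
      Std.TreeSet.foldl (fun np pos =>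
        jumps.foldl (fun np ab =>
          (np.insert (pos + ab.1)).insert (pos + ab.2)) np)
        Std.TreeSet.empty reach) = fun (s : Std.TreeSet Int compare) (_ : Int) => stepA jumps s :=
    rfl
  have hA : canReachCoordinate N jumps X = true ↔
      RepV (jumps.flatMap (fun ab => [ab.1, ab.2])) N.toNat X := by
    unfold canReachCoordinate
    rw [if_neg (by push_neg; exact ⟨by omega, hj⟩)]
    dsimp only
    rw [hstep, foldl_ignore (stepA jumps), PySem.List.length_pyRange_one,
        show ((N : Int) - 0).toNat = N.toNat by norm_num,
        iterate_stepA, Std.TreeSet.contains_iff_mem, mem_iterA]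
  apply bool_eq_iff
  rw [hA]
  unfold canReachCoordinate_alt
  rw [if_neg (by push_neg; exact ⟨by omega, hj⟩)]
  dsimp only
  set vals : List Int :=
    PySem.List.sorted (PySem.Set.ofList (jumps.flatMap (fun ab => [ab.1, ab.2]))) (fun v => v)
    with hvals
  set m := PySem.List.pyGetD vals 0 0 with hmdef
  set M := PySem.List.pyGetD vals (-1) 0 with hMdef
  set T0 := X - N * m with hT0
  set coins0 := (vals.filter (fun v => decide (v ≠ m))).map (fun v => v - m) with hcoins0
  set g := coins0.foldl (fun g c => pygcd g c) 0 with hgdef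
  set T1 := PySem.Int.floordiv T0 g with hT1def
  set coins1 := coins0.map (fun c => PySem.Int.floordiv c g) with hcoins1
  -- facts about vals
  have hmemv : ∀ v : Int, v ∈ vals ↔ v ∈ jumps.flatMap (fun ab => [ab.1, ab.2]) := by
    intro v; rw [hvals, PySem.List.mem_sorted, PySem.Set.mem_ofList]
  have hpw : vals.Pairwise (· < ·) := by
    rw [hvals]; exact PySem.List.sorted_ofList_pairwise_lt _
  have hx0v : x0 ∈ vals := (hmemv x0).mpr hx0
  have hvne : vals ≠ [] := List.ne_nil_of_mem hx0v
  obtain ⟨m0, tl, hcons⟩ : ∃ m0 tl, vals = m0 :: tl := by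
    cases hv : vals with
    | nil => exact absurd hv hvne
    | cons a b => exact ⟨a, b, rfl⟩
  have hm0 : m = m0 := by rw [hmdef, hcons, PySem.List.pyGetD_zero_cons]
  have hMlast : M = vals.getLast hvne := by rw [hMdef]; exact PySem.List.pyGetD_neg_one _ _ hvne
  have hm_mem : m ∈ vals := by rw [hm0, hcons]; simp
  have hmin : ∀ v ∈ vals, m ≤ v := by
    rw [hm0]
    intro v hv
    rw [hcons] at hv
    exact head_le_of_pairwise_lt m0 tl (hcons ▸ hpw) v hv
  have hmax : ∀ v ∈ vals, v ≤ M := by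
    rw [hMlast]
    exact le_getLast_of_pairwise_lt vals hpw hvne
  have hAv : RepV (jumps.flatMap (fun ab => [ab.1, ab.2])) N.toNat X ↔ RepV vals N.toNat X :=
    repV_congr _ _ (fun v => (hmemv v).symm) _ _
  have hbridge := repV_iff_repC vals m M N hm_mem hmin hmax hN X
  rw [← hT0] at hbridge
  have hcoins_iff : ∀ (k : Nat) (t : Int), RepC vals m k t ↔ RepV coins0 k t := by
    intro k t
    rw [hcoins0]
    exact repC_iff_coins0 vals m hmin k t
  have hcpos : ∀ c ∈ coins0, 0 < c := by
    intro c hc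
    rw [hcoins0] at hc
    obtain ⟨v, hv, rfl⟩ := List.mem_map.mp hc
    have hv' := List.mem_filter.mp hv
    have h1 := hmin v hv'.1
    have h2 : v ≠ m := by simpa using hv'.2
    omega
  rw [hAv]
  split_ifs with hg1 hc0 hmod hsel
  · -- out of range: both false
    simp only [Bool.false_eq_true, iff_false]
    intro hrep
    obtain ⟨h0, h1, -⟩ := hbridge.mp hrep
    rcases hg1 with h | h <;> omega
  · -- no positive coins: vals = [m], and the range check forced T0 = 0
    have hall : ∀ v ∈ vals, v = m := by
      intro v hv
      by_contra hne
      have : (v - m) ∈ coins0 := by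
        rw [hcoins0]
        exact List.mem_map.mpr ⟨v, List.mem_filter.mpr ⟨hv, by simpa using hne⟩, rfl⟩
      rw [hc0] at this
      simp at this
    have hMm : M = m := hall M (hMlast ▸ List.getLast_mem hvne)
    obtain ⟨h0, h1⟩ := not_or.mp hg1
    have hT00 : T0 = 0 := by
      have hz : N * (M - m) = 0 := by rw [hMm]; ring
      omega
    simp only [iff_true]
    exact hbridge.mpr ⟨by omega, by omega, 0, Nat.zero_le _, ⟨[], by simp, rfl, by simp [hT00]⟩⟩
  · -- T0 not divisible by the gcd: both false
    obtain ⟨hdvd, hge, hposg⟩ := fold_pygcd coins0 hcpos 0 le_rfl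
    have hgpos : 0 < g := by rw [hgdef]; exact hposg (Or.inr hc0)
    simp only [Bool.false_eq_true, iff_false]
    intro hrep
    obtain ⟨-, -, k, hk, hrepc⟩ := hbridge.mp hrep
    obtain ⟨l, hlm, hll, hls⟩ := (hcoins_iff k T0).mp hrepc
    have : g ∣ T0 := by
      rw [← hls]
      exact List.dvd_sum (fun c hc => by rw [hgdef]; exact hdvd c (hlm c hc))
    exact hmod ((mod_zero_iff T0 g hgpos).mpr this)
  · -- min-coins DP branch
    obtain ⟨hdvd, hge, hposg⟩ := fold_pygcd coins0 hcpos 0 le_rfl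
    have hgpos : 0 < g := by rw [hgdef]; exact hposg (Or.inr hc0)
    have hdvd' : ∀ c ∈ coins0, g ∣ c := fun c hc => by rw [hgdef]; exact hdvd c hc
    have hdvT : g ∣ T0 := (mod_zero_iff T0 g hgpos).mp (not_ne_iff.mp hmod)
    have hT0g : T0 = g * T1 := by
      rw [hT1def]
      exact (fdiv_exact g T0 (by omega) hdvT).symm
    obtain ⟨h0, h1⟩ := not_or.mp hg1
    have hT1nn : 0 ≤ T1 := by nlinarith [hT0g]
    have hc1pos : ∀ c ∈ coins1, 0 < c := by
      intro c hc
      rw [hcoins1] at hc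
      obtain ⟨c0, hc0m, rfl⟩ := List.mem_map.mp hc
      have h2 := hcpos c0 hc0m
      have h3 := fdiv_exact g c0 (by omega) (hdvd' c0 hc0m)
      nlinarith
    have hchain : RepV vals N.toNat X ↔ ∃ k : Nat, k ≤ N.toNat ∧ RepV coins1 k T1 := by
      rw [hbridge]
      constructor
      · rintro ⟨-, -, k, hk, hrep⟩
        refine ⟨k, hk, ?_⟩
        rw [hcoins1]
        exact (repV_scale coins0 g hgpos hdvd' k T0 T1 hT0g).mp ((hcoins_iff k T0).mp hrep)
      · rintro ⟨k, hk, hrep⟩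
        rw [hcoins1] at hrep
        exact ⟨by omega, by omega, k, hk,
          (hcoins_iff k T0).mpr ((repV_scale coins0 g hgpos hdvd' k T0 T1 hT0g).mpr hrep)⟩
    rw [hchain]
    have hfun : (fun (dp : Array Int) (t : Int) => dp.push (coins1.foldl (fun best c =>
        if c ≤ t then
          (if dp.getD (t - c).toNat 0 + 1 < best then dp.getD (t - c).toNat 0 + 1
           else best)
        else best) (N + 1))) = dpStep coins1 N := rfl
    rw [hfun]
    have hu : ((T1.toNat : Int)) = T1 := Int.toNat_of_nonneg hT1nn
    rw [show T1 + 1 = ((T1.toNat : Int)) + 1 by omega, fold_pyRange_dp]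
    have hlen := length_dpF coins1 N T1.toNat
    rw [array_getD_toList]
    obtain ⟨G1, G2, G3, G4⟩ := dpF_good coins1 N (by omega) hc1pos T1.toNat T1.toNat le_rfl
    rw [decide_eq_true_iff]
    constructor
    · rintro ⟨k, hk, hrep⟩
      have := G4 k (by rwa [hu])
      omega
    · intro hle
      refine ⟨((dpF coins1 N T1.toNat).toList.getD T1.toNat 0).toNat, by omega, ?_⟩
      have := G3 hle
      rwa [hu] at this
  · -- exact-count enumeration branch
    rw [canExact_iff vals hpw hvne N X (le_of_lt hN)]

-- ===== VERDICT (by name: the statement is the Claim_ definition above) =====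
theorem canReachCoordinate_spec : Claim_unchanged_canReachCoordinate := by
  intro N jumps X _ hD
  by_cases hj : jumps = []
  · subst hj; simp [canReachCoordinate, canReachCoordinate_alt]
  · rcases lt_trichotomy N 0 with hN | hN | hN
    · -- N < 0, jumps ≠ [] : from ¬D, X ≠ 0
      have hX : X ≠ 0 := by
        intro h; exact hD ⟨hN, hj, h⟩
      have hA : canReachCoordinate N jumps X = false := by
        unfold canReachCoordinate
        rw [if_neg (by push_neg; exact ⟨by omega, hj⟩)]
        rw [PySem.List.pyRange_one_eq_nil (by omega)]
        dsimp only [List.foldl]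
        rw [← Bool.not_eq_true, Std.TreeSet.contains_iff_mem]
        simp only [Std.TreeSet.mem_insert, Std.LawfulEqCmp.compare_eq_iff_eq,
          Std.TreeSet.empty_eq_emptyc, Std.TreeSet.not_mem_emptyc, or_false]
        omega
      have hB : canReachCoordinate_alt N jumps X = false := by
        unfold canReachCoordinate_alt
        rw [if_pos (Or.inl (by omega))]
      rw [hA, hB]
    · subst hN
      simp [canReachCoordinate, canReachCoordinate_alt]
    · exact main_pos N jumps X hN hj

theorem canReachCoordinate_changed : Claim_changed_canReachCoordinate := by
  unfold Claim_changed_canReachCoordinate; decide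

theorem canReachCoordinate_tight : Claim_exact_canReachCoordinate := by
  intro N jumps X _ hD
  rcases hD with ⟨hN, hj, rfl⟩
  have hA : canReachCoordinate N jumps 0 = true := by
    unfold canReachCoordinate
    rw [if_neg (by push_neg; exact ⟨by omega, hj⟩)]
    rw [PySem.List.pyRange_one_eq_nil (by omega)]
    dsimp only [List.foldl]
    rw [Std.TreeSet.contains_iff_mem]
    simp [Std.TreeSet.mem_insert, Std.LawfulEqCmp.compare_eq_iff_eq]
  have hB : canReachCoordinate_alt N jumps 0 = false := by
    unfold canReachCoordinate_alt
    rw [if_pos (Or.inl (by omega))]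
  rw [hA, hB]; simp
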